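-- pv_equiv track=rewrite | github.com/mwiesbau/CS483-Project | algorithms.py | gray_rank
-- ===== SOURCE A (Python) =====
-- def gray_rank(record, N):
--     '''
--     Computes the rank of a Grey Order Record
--     :param record:
--     :param N: number of possible values for field
--     :return:
--     '''
--
--     i = record[0]
--
--     for j in range(1, len(record)):
--         if i % 2 == 0:
--             i_2 = record[j]
--         else:
--             i_2 = N - 1 - record[j]
--
--         i = i * N + i_2
--
--     return i
-- ===== SOURCE B (Python) =====
-- def gray_rank(record, N):
--     # Decode flips come from the raw record's prefix parities alone (independent
--     # of N and of the evaluated value); then evaluate the decoded digits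
--     # right-to-left with explicit place weights.
--     flips = []
--     q = 0
--     for x in record:
--         flips.append(q)
--         q = (q + x) % 2
--     total = 0
--     w = 1
--     for x, f in zip(reversed(record), reversed(flips)):
--         total += (x if f == 0 else N - 1 - x) * w
--         w *= N
--     return total
-- ===== Notes on version B (the rewrite author's own statement) =====
-- stated objective: alternative
-- what changed: B decides each Gray reflection from the raw record's prefix parity alone (a pass over the input, never touching the evaluated value or N) and then evaluates the decoded digits right-to-left with explicit place weights, instead of A's single left-to-right loop whose reflection test reads the parity of the growing accumulator and whose value grows by Horner steps.
import Mathlib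
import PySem

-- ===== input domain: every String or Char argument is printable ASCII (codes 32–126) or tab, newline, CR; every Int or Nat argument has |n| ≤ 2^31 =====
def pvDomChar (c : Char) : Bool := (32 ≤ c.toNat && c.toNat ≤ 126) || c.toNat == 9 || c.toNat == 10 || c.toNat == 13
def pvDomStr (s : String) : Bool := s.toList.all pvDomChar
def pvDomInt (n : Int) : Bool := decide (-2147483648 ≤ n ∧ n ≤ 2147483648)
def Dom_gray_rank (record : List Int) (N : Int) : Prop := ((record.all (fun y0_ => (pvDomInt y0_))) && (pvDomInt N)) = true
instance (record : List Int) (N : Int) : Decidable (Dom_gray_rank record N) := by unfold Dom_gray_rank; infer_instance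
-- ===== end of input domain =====

-- B decides each Gray reflection from the raw record's prefix parity (a pass over the input
-- alone) and evaluates the decoded digits right-to-left with explicit place weights, instead of
-- A's single loop that tests the parity of the growing accumulator and grows it by Horner steps.

-- ===== PORT A =====
def gray_rank (record : List Int) (N : Int) : Int :=
  (PySem.List.pyRange 1 (record.length : Int) 1).foldl
    (fun i j =>
      let i2 := if PySem.Int.mod i 2 = 0 then PySem.List.pyGetD record j 0
                else N - 1 - PySem.List.pyGetD record j 0
      i * N + i2)
    (PySem.List.pyGetD record 0 0)

-- ===== PORT B =====
def gray_rank_alt (record : List Int) (N : Int) : Int :=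
  let flips := (record.foldl
    (fun (st : List Int × Int) x => (st.1 ++ [st.2], PySem.Int.mod (st.2 + x) 2))
    ([], 0)).1
  ((record.reverse.zip flips.reverse).foldl
    (fun (st : Int × Int) p =>
      (st.1 + (if p.2 = 0 then p.1 else N - 1 - p.1) * st.2, st.2 * N))
    (0, 1)).1

-- ===== PRECONDITION & SPEC =====
-- Pre_ excludes only the empty record, on which A raises IndexError at record[0].
def Pre_gray_rank (record : List Int) (N : Int) : Prop := record ≠ []
instance (record : List Int) (N : Int) : Decidable (Pre_gray_rank record N) := by unfold Pre_gray_rank; infer_instance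
def pvWitness_gray_rank : List Int × Int := ([1, 2, 0], 3)
def Spec_gray_rank (record : List Int) (N : Int) (out : Int) : Prop := out = gray_rank_alt record N
instance (record : List Int) (N : Int) (out : Int) : Decidable (Spec_gray_rank record N out) := by unfold Spec_gray_rank; infer_instance

-- ===== CLAIM (what is proved, stated in full; the proofs are below) =====
def Claim_equal_gray_rank : Prop := ∀ (record : List Int) (N : Int), Dom_gray_rank record N → Pre_gray_rank record N → Spec_gray_rank record N (gray_rank record N)

-- ===== LEMMAS AND PROOFS =====

-- Horner evaluation of a digit list, starting from accumulator a.
def pvHv (N : Int) (ds : List Int) (a : Int) : Int := ds.foldl (fun v d => v * N + d) a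

-- Prefix parities of a list, starting from parity q (already in {0,1}).
def pvFlips (q : Int) : List Int → List Int
  | [] => []
  | x :: t => q :: pvFlips (PySem.Int.mod (q + x) 2) t

-- Decode a record against its flip list.
def pvDec (N : Int) : List Int → List Int → List Int
  | x :: t, f :: ft => (if f = 0 then x else N - 1 - x) :: pvDec N t ft
  | _, _ => []

lemma pvFlips_length : ∀ (xs : List Int) (q : Int), (pvFlips q xs).length = xs.length
  | [], _ => rfl
  | _ :: t, q => by simp [pvFlips, pvFlips_length t]

lemma pvDec_length (N : Int) : ∀ (xs fs : List Int), xs.length = fs.length →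
    (pvDec N xs fs).length = xs.length
  | [], _, _ => by simp [pvDec]
  | x :: t, [], h => by simp at h
  | x :: t, f :: ft, h => by
      simp only [List.length_cons, Nat.add_right_cancel_iff] at h
      simp [pvDec, pvDec_length N t ft h]

lemma pvHv_init (N : Int) (ds : List Int) (a : Int) :
    pvHv N ds a = a * N ^ ds.length + pvHv N ds 0 := by
  induction ds generalizing a with
  | nil => simp [pvHv]
  | cons d t ih =>
    simp only [pvHv, List.foldl_cons] at *
    rw [ih (a * N + d), ih (0 * N + d), List.length_cons, pow_succ]
    ring

-- B's flip-building fold computes acc ++ pvFlips q.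
lemma flips_fold (xs : List Int) : ∀ (acc : List Int) (q : Int),
    (xs.foldl (fun (st : List Int × Int) x => (st.1 ++ [st.2], PySem.Int.mod (st.2 + x) 2))
      (acc, q)).1 = acc ++ pvFlips q xs := by
  induction xs with
  | nil => intro acc q; simp [pvFlips]
  | cons x t ih =>
    intro acc q
    simp only [List.foldl_cons]
    rw [ih (acc ++ [q]) (PySem.Int.mod (q + x) 2), pvFlips, List.append_assoc]
    simp

-- B's reversed weighted fold computes the Horner value of the decoded digits.
lemma eval_fold (N : Int) : ∀ (xs fs : List Int), xs.length = fs.length →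
    (xs.reverse.zip fs.reverse).foldl
      (fun (st : Int × Int) p =>
        (st.1 + (if p.2 = 0 then p.1 else N - 1 - p.1) * st.2, st.2 * N)) (0, 1)
    = (pvHv N (pvDec N xs fs) 0, N ^ xs.length) := by
  intro xs
  induction xs with
  | nil => intro fs h; cases fs with
    | nil => simp [pvHv, pvDec]
    | cons f ft => simp at h
  | cons x t ih =>
    intro fs h
    cases fs with
    | nil => simp at h
    | cons f ft =>
      simp only [List.length_cons, Nat.add_right_cancel_iff] at h
      have hz : (x :: t).reverse.zip ((f :: ft).reverse)
          = (t.reverse.zip ft.reverse) ++ [(x, f)] := by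
        simp only [List.reverse_cons]
        rw [List.zip_append (by simp [h])]
        simp
      rw [hz, List.foldl_append, ih ft h]
      simp only [List.foldl_cons, List.foldl_nil, Prod.mk.injEq]
      refine ⟨?_, by rw [List.length_cons, pow_succ]⟩
      rw [pvDec]
      simp only [pvHv, List.foldl_cons]
      rw [show ((0:Int) * N + (if f = 0 then x else N - 1 - x))
            = (if f = 0 then x else N - 1 - x) by ring]
      have hin := pvHv_init N (pvDec N t ft) (if f = 0 then x else N - 1 - x)
      simp only [pvHv] at hin
      rw [hin, pvDec_length N t ft h]
      ring

-- Parity step: the raw-prefix parity update matches the parity of A's next accumulator.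
lemma parity_step (i x N : Int) :
    PySem.Int.mod (PySem.Int.mod i 2 + x) 2
      = PySem.Int.mod (i * N + (if PySem.Int.mod i 2 = 0 then x else N - 1 - x)) 2 := by
  rw [PySem.Int.mod_eq_emod_of_pos (b := 2) (a := i) (by norm_num)]
  rw [PySem.Int.mod_eq_emod_of_pos (b := 2) (by norm_num),
      PySem.Int.mod_eq_emod_of_pos (b := 2) (by norm_num)]
  by_cases hc : i % 2 = 0
  · rw [if_pos hc, hc]
    obtain ⟨k, hk⟩ : ∃ k, i = 2 * k := ⟨i / 2, by omega⟩
    subst hk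
    rw [show 2 * k * N + x = x + 2 * (k * N) by ring]
    generalize k * N = m
    omega
  · have hc1 : i % 2 = 1 := by omega
    rw [if_neg hc, hc1]
    obtain ⟨k, hk⟩ : ∃ k, i = 2 * k + 1 := ⟨i / 2, by omega⟩
    subst hk
    rw [show (2 * k + 1) * N + (N - 1 - x) = (1 + x) + 2 * (k * N + N - 1 - x) by ring]
    generalize k * N + N - 1 - x = m
    omega

-- Main invariant: decoding with flips seeded at i's parity and Horner-evaluating from i
-- reproduces A's loop from accumulator i.
lemma decode_inv (N : Int) (rs : List Int) : ∀ (i : Int),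
    pvHv N (pvDec N rs (pvFlips (PySem.Int.mod i 2) rs)) i
      = rs.foldl
          (fun i x =>
            let i2 := if PySem.Int.mod i 2 = 0 then x else N - 1 - x
            i * N + i2) i := by
  induction rs with
  | nil => intro i; simp [pvHv, pvDec]
  | cons x t ih =>
    intro i
    rw [pvFlips, pvDec, parity_step i x N]
    simp only [pvHv, List.foldl_cons]
    exact ih (i * N + (if PySem.Int.mod i 2 = 0 then x else N - 1 - x))

-- ===== VERDICT (by name: the statement is the Claim_ definition above) =====
theorem gray_rank_spec : Claim_equal_gray_rank := by
  intro record N _ hpre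
  obtain ⟨r, rs, rfl⟩ : ∃ r rs, record = r :: rs := by
    cases record with
    | nil => exact absurd rfl hpre
    | cons r rs => exact ⟨r, rs, rfl⟩
  unfold Spec_gray_rank gray_rank gray_rank_alt
  have hA := PySem.List.foldl_pyRange_pyGetD' (xs := r :: rs) (a := (1 : Int)) (d := (0 : Int))
    (f := fun i x => i * N + (if PySem.Int.mod i 2 = 0 then x else N - 1 - x))
    (init := PySem.List.pyGetD (r :: rs) 0 0) (by norm_num)
  simp only [PySem.List.pyGetD] at hA ⊢
  simp only [hA]
  rw [flips_fold (r :: rs) [] 0, List.nil_append,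
      eval_fold N (r :: rs) (pvFlips 0 (r :: rs)) (pvFlips_length (r :: rs) 0).symm]
  have hf : pvFlips (0 : Int) (r :: rs) = 0 :: pvFlips (PySem.Int.mod r 2) rs := by
    rw [pvFlips]; simp
  rw [hf, pvDec]
  simp only [pvHv, List.foldl_cons]
  have hmain := decode_inv N rs r
  simp only [pvHv] at hmain
  simpa using hmain.symm
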